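-- pv_equiv track=rewrite | github.com/AmirTlinov/apply_task-mcp | core/desktop/devtools/interface/tui_app.py | _snap_cursor
-- ===== SOURCE A (Python) =====
-- from typing import Any, Dict, List, Optional, Tuple, Union, Set
--
-- def _snap_cursor(desired: int, focusables: List[int]) -> int:
--     if not focusables:
--         return max(0, desired)
--     if desired in focusables:
--         return desired
--     # ищем ближайший выше, затем ниже
--     above = [i for i in focusables if i < desired]
--     below = [i for i in focusables if i > desired]
--     if below:
--         return below[0]
--     if above:
--         return above[-1]
--     return focusables[0]
-- ===== SOURCE B (Python) =====
-- def _snap_cursor(desired, focusables):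
--     if not focusables:
--         return max(0, desired)
--     first_above = None
--     last_below = None
--     for x in focusables:
--         if x == desired:
--             return desired
--         if x > desired and first_above is None:
--             first_above = x
--         elif x < desired:
--             last_below = x
--     if first_above is not None:
--         return first_above
--     if last_below is not None:
--         return last_below
--     return focusables[0]
-- ===== Notes on version B (the rewrite author's own statement) =====
-- stated objective: alternative
-- what changed: Replaces the membership test plus the two filter comprehensions (three scans) with one single-pass loop that returns on an exact match and maintains first_above / last_below.
import Mathlib
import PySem

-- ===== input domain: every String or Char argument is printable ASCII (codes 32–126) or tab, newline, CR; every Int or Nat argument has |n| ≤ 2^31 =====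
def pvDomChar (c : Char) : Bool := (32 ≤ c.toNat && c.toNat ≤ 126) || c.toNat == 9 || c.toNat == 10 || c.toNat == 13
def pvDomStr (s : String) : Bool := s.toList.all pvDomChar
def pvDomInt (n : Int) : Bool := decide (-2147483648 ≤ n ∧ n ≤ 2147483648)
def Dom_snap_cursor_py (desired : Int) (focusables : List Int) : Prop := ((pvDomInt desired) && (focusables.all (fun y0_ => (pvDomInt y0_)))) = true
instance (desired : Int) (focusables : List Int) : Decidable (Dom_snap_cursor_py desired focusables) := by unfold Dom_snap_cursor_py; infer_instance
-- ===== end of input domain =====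

-- B replaces A's membership test and two filter comprehensions (three scans) by one
-- single-pass loop maintaining first_above / last_below (objective: alternative).

-- ===== PORT A =====
def snap_cursor_py (desired : Int) (focusables : List Int) : Int :=
  if focusables = [] then max 0 desired
  else if desired ∈ focusables then desired
  else
    let above := focusables.filter (fun i => i < desired)
    let below := focusables.filter (fun i => i > desired)
    if below ≠ [] then below.headD 0
    else if above ≠ [] then above.getLastD 0
    else focusables.headD 0

-- ===== PORT B =====
-- the for-loop of Source B, with early return on an exact match
def snapGo (desired : Int) (xs : List Int) (firstAbove lastBelow : Option Int)
    (fallback : Int) : Int :=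
  match xs with
  | [] =>
    match firstAbove with
    | some a => a
    | none =>
      match lastBelow with
      | some b => b
      | none => fallback
  | x :: rest =>
    if x = desired then desired
    else if x > desired ∧ firstAbove = none then snapGo desired rest (some x) lastBelow fallback
    else if x < desired then snapGo desired rest firstAbove (some x) fallback
    else snapGo desired rest firstAbove lastBelow fallback

def snap_cursor_py_alt (desired : Int) (focusables : List Int) : Int :=
  if focusables = [] then max 0 desired
  else snapGo desired focusables none none (focusables.headD 0)

-- ===== PRECONDITION & SPEC =====
def Spec_snap_cursor_py (desired : Int) (focusables : List Int) (out : Int) : Prop := out = snap_cursor_py_alt desired focusables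
instance (desired : Int) (focusables : List Int) (out : Int) : Decidable (Spec_snap_cursor_py desired focusables out) := by unfold Spec_snap_cursor_py; infer_instance

-- ===== CLAIM (what is proved, stated in full; the proofs are below) =====
def Claim_equal_snap_cursor_py : Prop := ∀ (desired : Int) (focusables : List Int), Dom_snap_cursor_py desired focusables → Spec_snap_cursor_py desired focusables (snap_cursor_py desired focusables)

-- ===== LEMMAS AND PROOFS =====

/-- Characterisation of the single-pass loop in terms of A's three scans. -/
theorem snapGo_eq (desired : Int) (xs : List Int) (fa lb : Option Int) (fb : Int) :
    snapGo desired xs fa lb fb =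
      if desired ∈ xs then desired
      else
        match fa.orElse (fun _ => (xs.filter (fun i => i > desired)).head?) with
        | some a => a
        | none =>
          match ((xs.filter (fun i => i < desired)).getLast?).orElse (fun _ => lb) with
          | some b => b
          | none => fb := by
  induction xs generalizing fa lb with
  | nil => simp [snapGo]
  | cons x rest ih =>
    by_cases hx : x = desired
    · subst hx; simp [snapGo]
    · by_cases hgt : x > desired
      · have hlt : ¬ x < desired := by omega
        cases fa with
        | none =>
          rw [show snapGo desired (x :: rest) none lb fb
              = snapGo desired rest (some x) lb fb by simp [snapGo, hx, hgt]]
          rw [ih]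
          simp [List.mem_cons, Ne.symm hx, hgt, Option.orElse]
        | some a =>
          rw [show snapGo desired (x :: rest) (some a) lb fb
              = snapGo desired rest (some a) lb fb by simp [snapGo, hx, hgt, hlt]]
          rw [ih]
          simp [List.mem_cons, Ne.symm hx, Option.orElse]
      · by_cases hlt : x < desired
        · rw [show snapGo desired (x :: rest) fa lb fb
              = snapGo desired rest fa (some x) fb by simp [snapGo, hx, hgt, hlt]]
          rw [ih]
          have hfil : (x :: rest).filter (fun i => i < desired)
              = x :: rest.filter (fun i => i < desired) := by simp [hlt]
          have hgl : ((x :: rest).filter (fun i => i < desired)).getLast?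
              = some (((rest.filter (fun i => i < desired)).getLast?).getD x) := by
            rw [hfil]
            cases h : (rest.filter (fun i => i < desired)).getLast? with
            | none =>
              have : rest.filter (fun i => i < desired) = [] := by
                cases hh : rest.filter (fun i => i < desired) with
                | nil => rfl
                | cons y ys => rw [hh] at h; simp [List.getLast?] at h
              simp [this]
            | some b =>
              cases hh : rest.filter (fun i => i < desired) with
              | nil => rw [hh] at h; simp at h
              | cons y ys =>
                rw [hh] at h
                simp only [Option.getD_some]
                rw [List.getLast?_cons_cons]; exact h
          rw [hgl]
          simp only [List.mem_cons, Ne.symm hx, false_or, List.filter_cons, hgt]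
          cases h : (rest.filter (fun i => i < desired)).getLast? with
          | none => simp [Option.orElse]
          | some b => simp [Option.orElse]
        · exact absurd (by omega : x = desired) hx

theorem snap_cursor_eq (desired : Int) (focusables : List Int) :
    snap_cursor_py desired focusables = snap_cursor_py_alt desired focusables := by
  unfold snap_cursor_py snap_cursor_py_alt
  by_cases hnil : focusables = []
  · simp [hnil]
  · simp only [hnil, if_false]
    rw [snapGo_eq]
    by_cases hmem : desired ∈ focusables
    · simp [hmem]
    · simp only [hmem, if_false]
      cases hb : focusables.filter (fun i => i > desired) with
      | cons y ys =>
        simp [Option.orElse]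
      | nil =>
        cases ha : focusables.filter (fun i => i < desired) with
        | nil =>
          exfalso
          obtain ⟨x, hx⟩ := List.exists_mem_of_ne_nil focusables hnil
          rcases lt_trichotomy x desired with h | h | h
          · have : x ∈ focusables.filter (fun i => i < desired) := by
              simp [List.mem_filter, hx, h]
            rw [ha] at this; simp at this
          · exact hmem (h ▸ hx)
          · have : x ∈ focusables.filter (fun i => i > desired) := by
              simp [List.mem_filter, hx, h]
            rw [hb] at this; simp at this
        | cons z zs =>
          cases hg : (z :: zs).getLast? with
          | none => simp [List.getLast?_eq_none_iff] at hg
          | some b =>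
            simp [hg, List.getLastD_eq_getLast?, Option.orElse]

-- ===== VERDICT (by name: the statement is the Claim_ definition above) =====
theorem snap_cursor_py_spec : Claim_equal_snap_cursor_py := by
  intro desired focusables _
  unfold Spec_snap_cursor_py
  exact snap_cursor_eq desired focusables
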